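-- pv_equiv track=rewrite | github.com/hamidrezaHemati/Internet-of-Things | IOT course - 2021 winter-spring semester/HW/hw3 LoRaWAN/source_code/سوال 7/q7.py | get_system_characteristics
-- ===== SOURCE A (Python) =====
-- def get_system_characteristics(list):
--     numberOfNodes = 0
--     initialLoRaSF = 0
--     initialLoRaBW = 0
--     initialLoRaTP = 0
--     for l in list:
--         for k, v in l.items():
--             if k == '**.numberOfNodes':
--                 numberOfNodes = v
--             elif k == "**.loRaNodes[*].**initialLoRaSF":
--                 initialLoRaSF = v
--             elif k == "**.loRaNodes[*].**initialLoRaBW":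
--                 initialLoRaBW = v
--             elif k == "**.loRaNodes[*].**initialLoRaTP":
--                 initialLoRaTP = v
--     return numberOfNodes, initialLoRaSF, initialLoRaTP, initialLoRaBW
-- ===== SOURCE B (Python) =====
-- def get_system_characteristics(list):
--     # Flatten all key/value pairs newest-first; for each key the FIRST match in this
--     # reversed stream is the last assignment A would have made (default 0).
--     pairs = [item for d in reversed(list) for item in reversed(d.items())]
--
--     def last(key):
--         for k, v in pairs:
--             if k == key:
--                 return v
--         return 0
--
--     return (last('**.numberOfNodes'),
--             last('**.loRaNodes[*].**initialLoRaSF'),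
--             last('**.loRaNodes[*].**initialLoRaTP'),
--             last('**.loRaNodes[*].**initialLoRaBW'))
-- ===== Notes on version B (the rewrite author's own statement) =====
-- stated objective: alternative
-- what changed: Instead of a forward scan with four mutable accumulators and an if/elif chain, B flattens all pairs in reverse (newest-first) order and answers each of the four keys by an independent first-match search with early exit (first match in the reversed stream = A's last-wins value).
import Mathlib
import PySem

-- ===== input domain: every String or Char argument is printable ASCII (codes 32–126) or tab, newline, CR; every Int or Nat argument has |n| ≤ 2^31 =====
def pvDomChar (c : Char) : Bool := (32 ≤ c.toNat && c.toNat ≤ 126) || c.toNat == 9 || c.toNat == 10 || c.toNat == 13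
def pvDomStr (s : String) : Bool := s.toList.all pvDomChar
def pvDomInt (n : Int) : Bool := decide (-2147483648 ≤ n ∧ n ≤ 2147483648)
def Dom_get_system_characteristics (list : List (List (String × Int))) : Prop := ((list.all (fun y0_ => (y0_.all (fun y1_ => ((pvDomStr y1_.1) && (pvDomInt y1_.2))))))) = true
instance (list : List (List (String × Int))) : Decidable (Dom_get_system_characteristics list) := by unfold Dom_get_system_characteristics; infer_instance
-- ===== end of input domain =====

-- B replaces A's forward scan with four mutable accumulators by flattening all pairs in
-- reverse (newest-first) order and answering each key with an independent first-match
-- search with early exit; objective: alternative.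

-- ===== PORT A =====
-- the if/elif chain of A's inner loop, on the state (numberOfNodes, initialLoRaSF, initialLoRaBW, initialLoRaTP)
def gscStep (acc : Int × Int × Int × Int) (kv : String × Int) : Int × Int × Int × Int :=
  if kv.1 = "**.numberOfNodes" then (kv.2, acc.2.1, acc.2.2.1, acc.2.2.2)
  else if kv.1 = "**.loRaNodes[*].**initialLoRaSF" then (acc.1, kv.2, acc.2.2.1, acc.2.2.2)
  else if kv.1 = "**.loRaNodes[*].**initialLoRaBW" then (acc.1, acc.2.1, kv.2, acc.2.2.2)
  else if kv.1 = "**.loRaNodes[*].**initialLoRaTP" then (acc.1, acc.2.1, acc.2.2.1, kv.2)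
  else acc

def get_system_characteristics (list : List (List (String × Int))) : Int × Int × Int × Int :=
  let st := list.foldl (fun acc l => ((PySem.Dict.ofList l).items).foldl gscStep acc) (0, 0, 0, 0)
  (st.1, st.2.1, st.2.2.2, st.2.2.1)

-- ===== PORT B =====
-- the helper 'last': first match in the (already reversed) pair stream, default 0
def gscLast (key : String) : List (String × Int) → Int
  | [] => 0
  | (k, v) :: rest => if k = key then v else gscLast key rest

def get_system_characteristics_alt (list : List (List (String × Int))) : Int × Int × Int × Int :=
  let pairs := list.reverse.flatMap (fun l => ((PySem.Dict.ofList l).items).reverse)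
  (gscLast "**.numberOfNodes" pairs,
   gscLast "**.loRaNodes[*].**initialLoRaSF" pairs,
   gscLast "**.loRaNodes[*].**initialLoRaTP" pairs,
   gscLast "**.loRaNodes[*].**initialLoRaBW" pairs)

-- ===== PRECONDITION & SPEC =====
def Spec_get_system_characteristics (list : List (List (String × Int))) (out : Int × Int × Int × Int) : Prop := out = get_system_characteristics_alt list
instance (list : List (List (String × Int))) (out : Int × Int × Int × Int) : Decidable (Spec_get_system_characteristics list out) := by unfold Spec_get_system_characteristics; infer_instance

-- ===== CLAIM (what is proved, stated in full; the proofs are below) =====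
def Claim_equal_get_system_characteristics : Prop := ∀ (list : List (List (String × Int))), Dom_get_system_characteristics list → Spec_get_system_characteristics list (get_system_characteristics list)

-- ===== LEMMAS AND PROOFS =====

-- the value a variable for key k holds after scanning ps starting from init (last match wins)
def lastVal (ps : List (String × Int)) (k : String) (init : Int) : Int :=
  ps.foldl (fun a p => if p.1 = k then p.2 else a) init

theorem lastVal_cons (p : String × Int) (ps : List (String × Int)) (k : String) (i : Int) :
    lastVal (p :: ps) k i = lastVal ps k (if p.1 = k then p.2 else i) := rfl

-- gscLast with an explicit default, for the induction
def gscLastD (key : String) (d : Int) : List (String × Int) → Int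
  | [] => d
  | (k, v) :: rest => if k = key then v else gscLastD key d rest

theorem gscLast_eq_gscLastD (key : String) (ps : List (String × Int)) :
    gscLast key ps = gscLastD key 0 ps := by
  induction ps with
  | nil => rfl
  | cons p ps ih => cases p; simp [gscLast, gscLastD, ih]

theorem gscLastD_append_single (key : String) (i : Int) (xs : List (String × Int))
    (p : String × Int) :
    gscLastD key i (xs ++ [p]) = gscLastD key (if p.1 = key then p.2 else i) xs := by
  induction xs with
  | nil => cases p; rfl
  | cons q xs ih => cases q; simp [gscLastD, ih]

theorem lastVal_eq_gscLastD_reverse (ps : List (String × Int)) (k : String) (i : Int) :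
    lastVal ps k i = gscLastD k i ps.reverse := by
  induction ps generalizing i with
  | nil => rfl
  | cons p ps ih =>
    rw [lastVal_cons, ih, List.reverse_cons, gscLastD_append_single]

theorem foldl_gscStep (ps : List (String × Int)) :
    ∀ a b c d : Int, ps.foldl gscStep (a, b, c, d) =
      (lastVal ps "**.numberOfNodes" a,
       lastVal ps "**.loRaNodes[*].**initialLoRaSF" b,
       lastVal ps "**.loRaNodes[*].**initialLoRaBW" c,
       lastVal ps "**.loRaNodes[*].**initialLoRaTP" d) := by
  induction ps with
  | nil => intro a b c d; rfl
  | cons p ps ih =>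
    intro a b c d
    simp only [List.foldl_cons, lastVal_cons, gscStep]
    by_cases h1 : p.1 = "**.numberOfNodes" <;>
      by_cases h2 : p.1 = "**.loRaNodes[*].**initialLoRaSF" <;>
        by_cases h3 : p.1 = "**.loRaNodes[*].**initialLoRaBW" <;>
          by_cases h4 : p.1 = "**.loRaNodes[*].**initialLoRaTP" <;>
            simp_all

-- A's nested fold is the fold over the flattened pair stream
theorem foldl_nested (list : List (List (String × Int))) (init : Int × Int × Int × Int) :
    list.foldl (fun acc l => ((PySem.Dict.ofList l).items).foldl gscStep acc) init
      = (list.flatMap (fun l => (PySem.Dict.ofList l).items)).foldl gscStep init := by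
  induction list generalizing init with
  | nil => rfl
  | cons l rest ih =>
    simp only [List.foldl_cons, List.flatMap_cons, List.foldl_append, ih]

theorem reverse_flatMap' (list : List (List (String × Int))) :
    (list.flatMap (fun l => (PySem.Dict.ofList l).items)).reverse
      = list.reverse.flatMap (fun l => ((PySem.Dict.ofList l).items).reverse) := by
  induction list with
  | nil => rfl
  | cons l rest ih =>
    simp [List.flatMap_cons, List.flatMap_append, ih]

-- ===== VERDICT (by name: the statement is the Claim_ definition above) =====
theorem get_system_characteristics_spec : Claim_equal_get_system_characteristics := by
  intro list _
  unfold Spec_get_system_characteristics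
  unfold get_system_characteristics get_system_characteristics_alt
  simp only [foldl_nested, foldl_gscStep, lastVal_eq_gscLastD_reverse,
    reverse_flatMap', gscLast_eq_gscLastD]
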